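-- pv_equiv track=rewrite | github.com/wyk18703232953/myResearch | codeComplex/data/onlyCode/python/np/python_np_0338.py | solve
-- ===== SOURCE A (Python) =====
-- def solve(i, n, delta, delta2):
--     inf = 2 * 10**9
--     dp = [[-1] * n for _ in range(1 << n)]
--     dp[(1 << i)][i] = inf
--     stack = [(1 << i, i)]
--
--     for t in range(1, n + 1):
--         next_s = []
--         for bit, v in stack:
--             for dest in range(n):
--                 if (1 << dest) & bit:
--                     continue
--                 if dp[bit | (1 << dest)][dest] == -1:
--                     next_s.append((bit | (1 << dest), dest))
--                 dp[bit | (1 << dest)][dest] = max(dp[bit | (1 << dest)][dest], min(dp[bit][v], delta[v][dest]))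
--
--         stack = next_s
--
--     return max(min(delta2[j][i], dp[-1][j]) for j in range(n) if i != j)
-- ===== SOURCE B (Python) =====
-- def solve(i, n, delta, delta2):
--     inf = 2 * 10**9
--     memo = {}
--
--     def d(mask, v):
--         # bottleneck value of the best path from i to v visiting exactly the cities in mask
--         if v == i:
--             return inf if mask == (1 << i) else -1
--         if not (mask >> v) & 1 or not (mask >> i) & 1:
--             return -1
--         key = (mask, v)
--         if key in memo:
--             return memo[key]
--         rest = mask ^ (1 << v)
--         best = -1
--         for u in range(n):
--             if (rest >> u) & 1:
--                 best = max(best, min(d(rest, u), delta[u][v]))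
--         memo[key] = best
--         return best
--
--     full = (1 << n) - 1
--     return max(min(delta2[j][i], d(full, j)) for j in range(n) if i != j)
-- ===== Notes on version B (the rewrite author's own statement) =====
-- stated objective: alternative
-- what changed: Replaces A's layered BFS worklist that fills a bottom-up 2^n x n dp table with a top-down memoized recursion d(mask, last) computing the same bottleneck values.
import Mathlib
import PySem

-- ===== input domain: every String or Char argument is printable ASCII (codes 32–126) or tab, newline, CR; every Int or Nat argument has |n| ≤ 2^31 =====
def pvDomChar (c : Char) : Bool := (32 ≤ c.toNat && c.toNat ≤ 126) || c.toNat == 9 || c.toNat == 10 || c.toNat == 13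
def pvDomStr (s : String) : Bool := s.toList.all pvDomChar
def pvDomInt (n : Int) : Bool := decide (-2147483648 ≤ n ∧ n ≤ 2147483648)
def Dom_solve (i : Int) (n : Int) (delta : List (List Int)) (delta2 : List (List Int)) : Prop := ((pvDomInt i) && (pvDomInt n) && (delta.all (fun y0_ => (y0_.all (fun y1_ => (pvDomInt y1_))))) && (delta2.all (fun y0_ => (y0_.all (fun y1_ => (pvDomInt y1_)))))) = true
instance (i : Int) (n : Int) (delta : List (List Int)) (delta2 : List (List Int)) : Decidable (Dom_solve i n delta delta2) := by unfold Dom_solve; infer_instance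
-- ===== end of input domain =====

-- B replaces A's layered BFS worklist that fills a bottom-up 2^n × n table with a
-- top-down memoized recursion on (mask, last); same exact result, same asymptotic cost.

-- shared input accessor: delta[a][b] (always in bounds on Pre_)
def pvGet2 (xss : List (List Int)) (a b : Nat) : Int := (xss.getD a []).getD b 0

-- shared port of Python's max() on a candidate list (never [] on Pre_)
def pyMaxList : List Int → Int
  | [] => 0
  | h :: t => t.foldl max h

-- ===== PORT A =====
-- body of A's innermost loop: one `dest` step for stack entry `e` on state (dp, next_s)
def stepA (delta : List (List Int)) (e : Nat × Nat)
    (st : (Nat → Nat → Int) × List (Nat × Nat)) (dest : Nat) :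
    (Nat → Nat → Int) × List (Nat × Nat) :=
  if 2 ^ dest &&& e.1 ≠ 0 then st
  else
    ((fun m v => if m = e.1 ||| 2 ^ dest ∧ v = dest
        then max (st.1 (e.1 ||| 2 ^ dest) dest) (min (st.1 e.1 e.2) (pvGet2 delta e.2 dest))
        else st.1 m v),
     if st.1 (e.1 ||| 2 ^ dest) dest = -1 then st.2 ++ [(e.1 ||| 2 ^ dest, dest)] else st.2)

-- A's `for dest in range(n)` loop for one stack entry
def innerA (delta : List (List Int)) (N : Nat) (e : Nat × Nat)
    (st : (Nat → Nat → Int) × List (Nat × Nat)) : (Nat → Nat → Int) × List (Nat × Nat) :=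
  (List.range N).foldl (stepA delta e) st

-- A's `for bit, v in stack` loop: one layer, starting with next_s = []
def layerA (delta : List (List Int)) (N : Nat)
    (st : (Nat → Nat → Int) × List (Nat × Nat)) : (Nat → Nat → Int) × List (Nat × Nat) :=
  st.2.foldl (fun st2 e => innerA delta N e st2) (st.1, [])

def solve (i : Int) (n : Int) (delta : List (List Int)) (delta2 : List (List Int)) : Int :=
  let N := n.toNat
  let I := i.toNat
  -- dp as a function table; dp[(1<<i)][i] = inf, everything else -1
  let res := (List.range N).foldl (fun st _t => layerA delta N st)
      ((fun m v => if m = 2 ^ I ∧ v = I then 2000000000 else -1), [(2 ^ I, I)])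
  -- max(min(delta2[j][i], dp[-1][j]) for j in range(n) if i != j); dp[-1] is row 2^N - 1
  let cands := (List.range N).filterMap (fun j =>
    if j ≠ I then some (min (pvGet2 delta2 j I) (res.1 (2 ^ N - 1) j)) else none)
  pyMaxList cands

-- ===== PORT B =====
-- B's recursive helper d(mask, v); the Python memo cache is dropped (same values),
-- `fuel` is a totality guard only (call sites keep mask ≤ fuel; rest < mask at each call)
def bdp (delta : List (List Int)) (N I : Nat) (fuel mask v : Nat) : Int :=
  if v = I then (if mask = 2 ^ I then 2000000000 else -1)
  else if ¬ mask.testBit v ∨ ¬ mask.testBit I then -1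
  else
    match fuel with
    | 0 => -1
    | f + 1 =>
      (List.range N).foldl
        (fun best u =>
          if (mask ^^^ 2 ^ v).testBit u then
            max best (min (bdp delta N I f (mask ^^^ 2 ^ v) u) (pvGet2 delta u v))
          else best) (-1)

def solve_alt (i : Int) (n : Int) (delta : List (List Int)) (delta2 : List (List Int)) : Int :=
  let N := n.toNat
  let I := i.toNat
  let cands := (List.range N).filterMap (fun j =>
    if j ≠ I then some (min (pvGet2 delta2 j I) (bdp delta N I (2 ^ N - 1) (2 ^ N - 1) j)) else none)
  pyMaxList cands

-- ===== PRECONDITION & SPEC =====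
-- Exactly the inputs on which the Python A returns: it raises unless n ≥ 2, 0 ≤ i < n,
-- and every delta[v][d] with v,d < n, d ≠ v, d ≠ i and every delta2[j][i] with j < n, j ≠ i exists.
def Pre_solve (i : Int) (n : Int) (delta : List (List Int)) (delta2 : List (List Int)) : Prop :=
  2 ≤ n ∧ 0 ≤ i ∧ i < n ∧
  (∀ v ∈ List.range n.toNat, ∀ d ∈ List.range n.toNat, d ≠ v → d ≠ i.toNat →
      v < delta.length ∧ d < (delta.getD v []).length) ∧
  (∀ j ∈ List.range n.toNat, j ≠ i.toNat →
      j < delta2.length ∧ i.toNat < (delta2.getD j []).length)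
instance (i : Int) (n : Int) (delta : List (List Int)) (delta2 : List (List Int)) : Decidable (Pre_solve i n delta delta2) := by unfold Pre_solve; infer_instance

def pvWitness_solve : Int × Int × List (List Int) × List (List Int) :=
  (0, 2, [[0, 3], [0, 0]], [[0, 0], [5, 0]])

def Spec_solve (i : Int) (n : Int) (delta : List (List Int)) (delta2 : List (List Int)) (out : Int) : Prop := out = solve_alt i n delta delta2
instance (i : Int) (n : Int) (delta : List (List Int)) (delta2 : List (List Int)) (out : Int) : Decidable (Spec_solve i n delta delta2 out) := by unfold Spec_solve; infer_instance

-- ===== CLAIM (what is proved, stated in full; the proofs are below) =====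
def Claim_equal_solve : Prop := ∀ (i : Int) (n : Int) (delta : List (List Int)) (delta2 : List (List Int)), Dom_solve i n delta delta2 → Pre_solve i n delta delta2 → Spec_solve i n delta delta2 (solve i n delta delta2)

-- ===== LEMMAS AND PROOFS =====

-- bit basics
theorem pv_and_iff (m d : Nat) : (2 ^ d &&& m ≠ 0) ↔ m.testBit d = true := by
  constructor
  · intro h; by_contra hb
    apply h; apply Nat.eq_of_testBit_eq; intro j
    simp only [Nat.testBit_and, Nat.testBit_two_pow, Nat.zero_testBit, Bool.and_eq_false_iff]
    by_cases hj : d = j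
    · subst hj; right; simpa using hb
    · left; simp [hj]
  · intro h hc
    have := congrArg (fun x => x.testBit d) hc
    simp [Nat.testBit_and, h] at this

theorem pv_tb_ge {m d : Nat} (h : m.testBit d = true) : 2 ^ d ≤ m := by
  by_contra hb
  rw [Nat.testBit_eq_false_of_lt (by omega)] at h; simp at h

theorem pv_bit_lt {m j N : Nat} (h1 : m.testBit j = true) (h2 : m < 2 ^ N) : j < N := by
  by_contra hb
  have := pv_tb_ge h1
  have : (2:Nat) ^ N ≤ 2 ^ j := Nat.pow_le_pow_right (by norm_num) (by omega)
  omega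

theorem pv_lt_two_pow {m N : Nat} (h : ∀ j, m.testBit j = true → j < N) : m < 2 ^ N := by
  have hm : m = m &&& (2 ^ N - 1) := by
    apply Nat.eq_of_testBit_eq; intro j
    simp only [Nat.testBit_and, Nat.testBit_two_pow_sub_one]
    by_cases hj : m.testBit j = true
    · simp [hj, h j hj]
    · simp [Bool.eq_false_iff.2 hj]
  calc m = m &&& (2 ^ N - 1) := hm
    _ ≤ 2 ^ N - 1 := Nat.and_le_right
    _ < 2 ^ N := by have : 0 < (2:Nat)^N := Nat.two_pow_pos N; omega

theorem pv_high_exists {m N : Nat} (h : ¬ m < 2 ^ N) : ∃ j, N ≤ j ∧ m.testBit j = true := by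
  by_contra hb
  simp only [not_exists, not_and] at hb
  refine h (pv_lt_two_pow (fun j hj => ?_))
  by_contra hc
  exact absurd hj (by simpa using hb j (by omega))

theorem pv_xor_tb {m d : Nat} : (m ^^^ 2 ^ d).testBit d = !m.testBit d := by
  simp [Nat.testBit_xor]

theorem pv_xor_tb_other {m d j : Nat} (h : j ≠ d) : (m ^^^ 2 ^ d).testBit j = m.testBit j := by
  simp [Nat.testBit_xor, Nat.testBit_two_pow, Ne.symm h]

theorem pv_or_tb_other {m d j : Nat} (h : j ≠ d) : (m ||| 2 ^ d).testBit j = m.testBit j := by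
  simp [Nat.testBit_or, Nat.testBit_two_pow, Ne.symm h]

theorem pv_xor_lt {m d : Nat} (h : m.testBit d = true) : m ^^^ 2 ^ d < m := by
  apply Nat.lt_of_testBit d (by simp [pv_xor_tb, h]) h
  intro j hj; exact pv_xor_tb_other (by omega)

theorem pv_or_xor_cancel {m d : Nat} (h : m.testBit d = true) : (m ^^^ 2 ^ d) ||| 2 ^ d = m := by
  apply Nat.eq_of_testBit_eq; intro j
  by_cases hj : j = d
  · subst hj; simp [Nat.testBit_or, h]
  · rw [pv_or_tb_other hj, pv_xor_tb_other hj]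

theorem pv_xor_or_cancel {b d : Nat} (h : b.testBit d = false) : (b ||| 2 ^ d) ^^^ 2 ^ d = b := by
  apply Nat.eq_of_testBit_eq; intro j
  by_cases hj : j = d
  · subst hj; simp [Nat.testBit_xor, Nat.testBit_or, h]
  · rw [pv_xor_tb_other hj, pv_or_tb_other hj]

theorem pv_ne_or {b d : Nat} (h : b.testBit d = false) : b ≠ b ||| 2 ^ d := by
  intro hc
  have := congrArg (fun x => x.testBit d) hc
  simp [Nat.testBit_or, h] at this

theorem pv_single_bit {m I : Nat} (hI : m.testBit I = true)
    (h : ∀ j, j ≠ I → m.testBit j = false) : m = 2 ^ I := by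
  apply Nat.eq_of_testBit_eq; intro j
  by_cases hj : j = I
  · subst hj; simp [hI]
  · simp [h j hj, Nat.testBit_two_pow, Ne.symm hj]

theorem pv_other_bit {m I : Nat} (hI : m.testBit I = true) (hne : m ≠ 2 ^ I) :
    ∃ u, u ≠ I ∧ m.testBit u = true := by
  by_contra hb
  simp only [not_exists, not_and] at hb
  refine hne (pv_single_bit hI (fun j hj => ?_))
  by_contra hc
  have hjt : m.testBit j = true := by by_contra h2; exact hc (by simpa using h2)
  exact absurd hjt (by simpa using hb j hj)

-- popcount below width w
def pcB (w m : Nat) : Nat := ((Finset.range w).filter (fun j => m.testBit j = true)).card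

theorem pcB_two_pow {w I : Nat} (h : I < w) : pcB w (2 ^ I) = 1 := by
  unfold pcB
  have : (Finset.range w).filter (fun j => (2 ^ I : Nat).testBit j = true) = {I} := by
    ext j
    simp [Nat.testBit_two_pow, Finset.mem_filter, eq_comm]
    intro hj; subst hj; omega
  rw [this]; simp

theorem pcB_or {w m d : Nat} (hd : d < w) (h : m.testBit d = false) :
    pcB w (m ||| 2 ^ d) = pcB w m + 1 := by
  unfold pcB
  have h1 : (Finset.range w).filter (fun j => (m ||| 2 ^ d).testBit j = true)
      = ((Finset.range w).filter (fun j => m.testBit j = true)) ∪ {d} := by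
    ext j
    by_cases hj : j = d
    · subst hj; simp [Nat.testBit_or, hd]
    · simp only [Finset.mem_filter, Finset.mem_union, Finset.mem_singleton, pv_or_tb_other hj]
      constructor
      · rintro ⟨h1, h2⟩; exact Or.inl ⟨h1, h2⟩
      · rintro (⟨h1, h2⟩ | h1)
        · exact ⟨h1, h2⟩
        · exact absurd h1 hj
  rw [h1, Finset.card_union_of_disjoint (by simp [Finset.disjoint_singleton_right, h]),
    Finset.card_singleton]

theorem pcB_xor {w m d : Nat} (hd : d < w) (h : m.testBit d = true) :
    pcB w m = pcB w (m ^^^ 2 ^ d) + 1 := by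
  have := pcB_or (m := m ^^^ 2 ^ d) hd (by simp [Nat.testBit_xor, h])
  rwa [pv_or_xor_cancel h] at this

theorem pcB_full (N : Nat) : pcB N (2 ^ N - 1) = N := by
  unfold pcB
  have : (Finset.range N).filter (fun j => ((2:Nat) ^ N - 1).testBit j = true) = Finset.range N := by
    ext j; simp [Nat.testBit_two_pow_sub_one]
  rw [this]; simp

theorem pcB_two_le {w m a b : Nat} (ha : a < w) (hb : b < w) (hab : a ≠ b)
    (h1 : m.testBit a = true) (h2 : m.testBit b = true) : 2 ≤ pcB w m := by
  have hsub : ({a, b} : Finset Nat) ⊆ (Finset.range w).filter (fun j => m.testBit j = true) := by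
    intro j hj
    simp at hj
    rcases hj with rfl | rfl <;> simp [Finset.mem_filter, *]
  have := Finset.card_le_card hsub
  rwa [Finset.card_pair hab] at this

theorem pcB_one {w m I : Nat} (hI : m.testBit I = true) (hm : m < 2 ^ w)
    (h : pcB w m ≤ 1) : m = 2 ^ I := by
  apply pv_single_bit hI
  intro j hj
  by_contra hc
  have hjt : m.testBit j = true := by by_contra h2; exact hc (by simpa using h2)
  have := pcB_two_le (pv_bit_lt hjt hm) (pv_bit_lt hI hm) hj hjt hI
  omega

-- fold max lemmas (Int)
theorem foldl_max_le_iff (l : List Int) (a b : Int) :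
    l.foldl max a ≤ b ↔ a ≤ b ∧ ∀ x ∈ l, x ≤ b := by
  induction l generalizing a with
  | nil => simp
  | cons x l ih =>
    simp only [List.foldl_cons, ih, max_le_iff, List.mem_cons]
    constructor
    · rintro ⟨⟨h1, h2⟩, h3⟩; exact ⟨h1, fun y hy => by rcases hy with rfl | hy; exact h2; exact h3 y hy⟩
    · rintro ⟨h1, h2⟩; exact ⟨⟨h1, h2 x (Or.inl rfl)⟩, fun y hy => h2 y (Or.inr hy)⟩

theorem le_foldl_max (l : List Int) (a : Int) : a ≤ l.foldl max a :=
  ((foldl_max_le_iff l a _).mp le_rfl).1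

theorem mem_le_foldl_max {l : List Int} {x : Int} (a : Int) (h : x ∈ l) : x ≤ l.foldl max a :=
  ((foldl_max_le_iff l a _).mp le_rfl).2 x h

theorem foldl_if_max (l : List Nat) (c : Nat → Bool) (g : Nat → Int) (a : Int) :
    l.foldl (fun b u => if c u then max b (g u) else b) a = ((l.filter c).map g).foldl max a := by
  induction l generalizing a with
  | nil => rfl
  | cons x l ih =>
    by_cases hx : c x <;> simp [List.filter_cons, hx, ih]
-- contributions that stack prefix s makes to cell (m, v)
def contribs (delta : List (List Int)) (N : Nat) (dpc : Nat → Nat → Int)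
    (s : List (Nat × Nat)) (m v : Nat) : List Int :=
  s.filterMap (fun e =>
    if v < N ∧ e.1.testBit v = false ∧ m = e.1 ||| 2 ^ v
    then some (min (dpc e.1 e.2) (pvGet2 delta e.2 v)) else none)

theorem stepA_dp (delta : List (List Int)) (e : Nat × Nat)
    (st : (Nat → Nat → Int) × List (Nat × Nat)) (d m v : Nat) :
    (stepA delta e st d).1 m v =
      if v = d ∧ e.1.testBit v = false ∧ m = e.1 ||| 2 ^ v
      then max (st.1 m v) (min (st.1 e.1 e.2) (pvGet2 delta e.2 v)) else st.1 m v := by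
  unfold stepA
  by_cases hg : (2 ^ d &&& e.1 ≠ 0)
  · have hb := (pv_and_iff e.1 d).mp hg
    rw [if_pos hg, if_neg]
    rintro ⟨rfl, h2, h3⟩
    rw [hb] at h2; exact absurd h2 (by decide)
  · have hb : e.1.testBit d = false := by
      by_contra h2
      exact hg ((pv_and_iff e.1 d).mpr (by simpa using h2))
    rw [if_neg hg]
    dsimp only
    by_cases hc : m = e.1 ||| 2 ^ d ∧ v = d
    · obtain ⟨hc1, hc2⟩ := hc
      rw [if_pos ⟨hc1, hc2⟩, if_pos ⟨hc2, by rw [hc2]; exact hb, by rw [hc2]; exact hc1⟩]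
      rw [hc1, hc2]
    · rw [if_neg hc, if_neg]
      rintro ⟨h1, h2, h3⟩
      exact hc ⟨by rw [← h1]; exact h3, h1⟩

theorem stepA_next (delta : List (List Int)) (e : Nat × Nat)
    (st : (Nat → Nat → Int) × List (Nat × Nat)) (d : Nat) (p : Nat × Nat) :
    p ∈ (stepA delta e st d).2 ↔ p ∈ st.2 ∨
      (p.2 = d ∧ e.1.testBit d = false ∧ p.1 = e.1 ||| 2 ^ d ∧ st.1 p.1 p.2 = -1) := by
  unfold stepA
  by_cases hg : (2 ^ d &&& e.1 ≠ 0)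
  · have hb := (pv_and_iff e.1 d).mp hg
    rw [if_pos hg]
    constructor
    · exact Or.inl
    · rintro (h | ⟨h1, h2, h3, h4⟩)
      · exact h
      · rw [hb] at h2; exact absurd h2 (by decide)
  · have hb : e.1.testBit d = false := by
      by_contra h2
      exact hg ((pv_and_iff e.1 d).mpr (by simpa using h2))
    rw [if_neg hg]
    dsimp only
    by_cases hp : st.1 (e.1 ||| 2 ^ d) d = -1
    · rw [if_pos hp]
      rw [List.mem_append, List.mem_singleton]
      constructor
      · rintro (h | h)
        · exact Or.inl h
        · subst h; exact Or.inr ⟨rfl, hb, rfl, hp⟩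
      · rintro (h | ⟨h1, h2, h3, h4⟩)
        · exact Or.inl h
        · exact Or.inr (Prod.ext_iff.mpr ⟨h3, h1⟩)
    · rw [if_neg hp]
      constructor
      · exact Or.inl
      · rintro (h | ⟨h1, h2, h3, h4⟩)
        · exact h
        · rw [h3, h1] at h4; exact absurd h4 hp

-- the source cell of entry e is never a target of its own inner loop
theorem stepA_src (delta : List (List Int)) (e : Nat × Nat)
    (st : (Nat → Nat → Int) × List (Nat × Nat)) (d : Nat) :
    (stepA delta e st d).1 e.1 e.2 = st.1 e.1 e.2 := by
  rw [stepA_dp, if_neg]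
  rintro ⟨h1, h2, h3⟩
  exact pv_ne_or h2 h3

theorem innerA_go_dp (delta : List (List Int)) (e : Nat × Nat) :
    ∀ (l : List Nat) (st : (Nat → Nat → Int) × List (Nat × Nat)) (m v : Nat),
    (l.foldl (stepA delta e) st).1 m v =
      if v ∈ l ∧ e.1.testBit v = false ∧ m = e.1 ||| 2 ^ v
      then max (st.1 m v) (min (st.1 e.1 e.2) (pvGet2 delta e.2 v)) else st.1 m v := by
  intro l
  induction l with
  | nil => intro st m v; simp
  | cons d l ih =>
    intro st m v
    rw [List.foldl_cons, ih, stepA_src delta e st d, stepA_dp]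
    by_cases h3 : v = d
    · subst h3
      by_cases h1 : e.1.testBit v = false <;> by_cases h2 : m = e.1 ||| 2 ^ v <;>
        by_cases h4 : v ∈ l <;>
          simp [h1, h2, h4, List.mem_cons, max_assoc, max_self]
    · by_cases h1 : e.1.testBit v = false <;> by_cases h2 : m = e.1 ||| 2 ^ v <;>
        by_cases h4 : v ∈ l <;>
          simp [h1, h2, h3, h4, List.mem_cons]
theorem stepA_pres_ge (delta : List (List Int)) (e : Nat × Nat)
    (st : (Nat → Nat → Int) × List (Nat × Nat)) (d : Nat)
    (h : ∀ m v, -1 ≤ st.1 m v) : ∀ m v, -1 ≤ (stepA delta e st d).1 m v := by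
  intro m v; rw [stepA_dp]; split_ifs
  · exact le_trans (h m v) (le_max_left _ _)
  · exact h m v

theorem innerA_pres_ge (delta : List (List Int)) (e : Nat × Nat) (l : List Nat)
    (st : (Nat → Nat → Int) × List (Nat × Nat))
    (h : ∀ m v, -1 ≤ st.1 m v) : ∀ m v, -1 ≤ (l.foldl (stepA delta e) st).1 m v := by
  intro m v; rw [innerA_go_dp]; split_ifs
  · exact le_trans (h m v) (le_max_left _ _)
  · exact h m v

theorem innerA_go_next (delta : List (List Int)) (e : Nat × Nat) :
    ∀ (l : List Nat) (st : (Nat → Nat → Int) × List (Nat × Nat)) (p : Nat × Nat),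
    (∀ m v, -1 ≤ st.1 m v) →
    (p ∈ (l.foldl (stepA delta e) st).2 ↔ p ∈ st.2 ∨
      (p.2 ∈ l ∧ e.1.testBit p.2 = false ∧ p.1 = e.1 ||| 2 ^ p.2 ∧ st.1 p.1 p.2 = -1)) := by
  intro l
  induction l with
  | nil => intro st p h; simp
  | cons d l ih =>
    intro st p hge
    rw [List.foldl_cons, ih _ p (stepA_pres_ge delta e st d hge), stepA_next, stepA_dp]
    by_cases h3 : p.2 = d
    · subst h3
      by_cases hC2 : e.1.testBit p.2 = false
      · by_cases hC3 : p.1 = e.1 ||| 2 ^ p.2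
        · rw [if_pos ⟨rfl, hC2, hC3⟩]
          have h5 := hge p.1 p.2
          have h6 : st.1 p.1 p.2 ≤ max (st.1 p.1 p.2) (min (st.1 e.1 e.2) (pvGet2 delta e.2 p.2)) :=
            le_max_left _ _
          constructor
          · rintro ((h | h) | h)
            · exact Or.inl h
            · exact Or.inr ⟨List.mem_cons_self .., hC2, hC3, h.2.2.2⟩
            · refine Or.inr ⟨List.mem_cons_of_mem _ h.1, hC2, hC3, ?_⟩
              have h7 := h.2.2.2
              rw [h7] at h6
              omega
          · rintro (h | h)
            · exact Or.inl (Or.inl h)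
            · exact Or.inl (Or.inr ⟨rfl, hC2, hC3, h.2.2.2⟩)
        · rw [if_neg (fun hh => hC3 hh.2.2)]
          constructor
          · rintro ((h | h) | h)
            · exact Or.inl h
            · exact absurd h.2.2.1 hC3
            · exact absurd h.2.2.1 hC3
          · rintro (h | h)
            · exact Or.inl (Or.inl h)
            · exact absurd h.2.2.1 hC3
      · rw [if_neg (fun hh => hC2 hh.2.1)]
        constructor
        · rintro ((h | h) | h)
          · exact Or.inl h
          · exact absurd h.2.1 hC2
          · exact absurd h.2.1 hC2
        · rintro (h | h)
          · exact Or.inl (Or.inl h)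
          · exact absurd h.2.1 hC2
    · rw [if_neg (fun hh => h3 hh.1)]
      simp only [List.mem_cons]
      constructor
      · rintro ((h | ⟨h1, h2⟩) | ⟨h1, h2⟩)
        · exact Or.inl h
        · exact absurd h1 h3
        · exact Or.inr ⟨Or.inr h1, h2⟩
      · rintro (h | ⟨(h1 | h1), h2⟩)
        · exact Or.inl (Or.inl h)
        · exact absurd h1 h3
        · exact Or.inr ⟨h1, h2⟩

theorem contribs_congr (delta : List (List Int)) (N : Nat) (f g : Nat → Nat → Int)
    (s : List (Nat × Nat)) (m v : Nat) (h : ∀ e ∈ s, f e.1 e.2 = g e.1 e.2) :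
    contribs delta N f s m v = contribs delta N g s m v := by
  unfold contribs
  induction s with
  | nil => rfl
  | cons e s ih =>
    rw [List.filterMap_cons, List.filterMap_cons,
      ih (fun e' he' => h e' (List.mem_cons_of_mem e he'))]
    rw [h e (List.mem_cons_self ..)]

theorem layer_go_dp (delta : List (List Int)) (N T : Nat) :
    ∀ (s : List (Nat × Nat)) (st : (Nat → Nat → Int) × List (Nat × Nat)) (m v : Nat),
    (∀ e ∈ s, pcB N e.1 = T) →
    (s.foldl (fun st2 e => innerA delta N e st2) st).1 m v
      = (contribs delta N st.1 s m v).foldl max (st.1 m v) := by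
  intro s
  induction s with
  | nil => intro st m v h; simp [contribs]
  | cons e s ih =>
    intro st m v hs
    have hdp' : ∀ m' v', (innerA delta N e st).1 m' v' =
        if v' < N ∧ e.1.testBit v' = false ∧ m' = e.1 ||| 2 ^ v'
        then max (st.1 m' v') (min (st.1 e.1 e.2) (pvGet2 delta e.2 v')) else st.1 m' v' := by
      intro m' v'
      rw [innerA, innerA_go_dp]
      simp [List.mem_range]
    have key1 : ∀ e' ∈ s, (innerA delta N e st).1 e'.1 e'.2 = st.1 e'.1 e'.2 := by
      intro e' he'
      rw [hdp']
      rw [if_neg]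
      rintro ⟨hh1, hh2, hh3⟩
      have h1 := hs e' (List.mem_cons_of_mem e he')
      have h2 := hs e (List.mem_cons_self ..)
      rw [hh3] at h1
      rw [pcB_or hh1 hh2] at h1
      omega
    rw [List.foldl_cons, ih _ m v (fun e' he' => hs e' (List.mem_cons_of_mem e he')),
      contribs_congr delta N _ _ s m v key1, hdp']
    show _ = (contribs delta N st.1 (e :: s) m v).foldl max (st.1 m v)
    unfold contribs
    rw [List.filterMap_cons]
    by_cases hc : v < N ∧ e.1.testBit v = false ∧ m = e.1 ||| 2 ^ v
    · rw [if_pos hc, if_pos hc, List.foldl_cons]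
    · rw [if_neg hc, if_neg hc]

theorem layer_next_mono (delta : List (List Int)) (N : Nat) :
    ∀ (s : List (Nat × Nat)) (st : (Nat → Nat → Int) × List (Nat × Nat)) (p : Nat × Nat),
    p ∈ st.2 → p ∈ (s.foldl (fun st2 e => innerA delta N e st2) st).2 := by
  intro s
  induction s with
  | nil => intro st p h; exact h
  | cons e s ih =>
    intro st p h
    refine ih _ p ?_
    have : ∀ (l : List Nat) (st' : (Nat → Nat → Int) × List (Nat × Nat)),
        p ∈ st'.2 → p ∈ (l.foldl (stepA delta e) st').2 := by
      intro l
      induction l with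
      | nil => intro st' h'; exact h'
      | cons d l ihl => intro st' h'; exact ihl _ ((stepA_next delta e st' d p).mpr (Or.inl h'))
    exact this (List.range N) st h

theorem layer_next_sub (delta : List (List Int)) (N : Nat) :
    ∀ (s : List (Nat × Nat)) (st : (Nat → Nat → Int) × List (Nat × Nat)) (p : Nat × Nat),
    (∀ m v, -1 ≤ st.1 m v) →
    p ∈ (s.foldl (fun st2 e => innerA delta N e st2) st).2 →
    p ∈ st.2 ∨ ∃ e ∈ s, p.2 < N ∧ e.1.testBit p.2 = false ∧ p.1 = e.1 ||| 2 ^ p.2 := by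
  intro s
  induction s with
  | nil => intro st p _ h; exact Or.inl h
  | cons e s ih =>
    intro st p hge h
    rcases ih _ p (innerA_pres_ge delta e _ st hge) h with h1 | ⟨e', he', hc⟩
    · rcases (innerA_go_next delta e (List.range N) st p hge).mp h1 with h2 | ⟨hm, hc⟩
      · exact Or.inl h2
      · exact Or.inr ⟨e, List.mem_cons_self .., List.mem_range.mp hm, hc.1, hc.2.1⟩
    · exact Or.inr ⟨e', List.mem_cons_of_mem e he', hc⟩

theorem layer_next_push (delta : List (List Int)) (N T : Nat) :
    ∀ (s : List (Nat × Nat)) (st : (Nat → Nat → Int) × List (Nat × Nat)) (p : Nat × Nat),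
    (∀ m v, -1 ≤ st.1 m v) →
    st.1 p.1 p.2 = -1 →
    (∃ e ∈ s, p.2 < N ∧ e.1.testBit p.2 = false ∧ p.1 = e.1 ||| 2 ^ p.2) →
    p ∈ (s.foldl (fun st2 e => innerA delta N e st2) st).2 := by
  intro s
  induction s with
  | nil => rintro st p _ _ ⟨e, he, _⟩; exact absurd he (List.not_mem_nil)
  | cons e s ih =>
    intro st p hge hval hex
    by_cases hc : p.2 < N ∧ e.1.testBit p.2 = false ∧ p.1 = e.1 ||| 2 ^ p.2
    · refine layer_next_mono delta N s _ p ?_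
      exact (innerA_go_next delta e (List.range N) st p hge).mpr
        (Or.inr ⟨List.mem_range.mpr hc.1, hc.2.1, hc.2.2, hval⟩)
    · have hval' : (innerA delta N e st).1 p.1 p.2 = st.1 p.1 p.2 := by
        rw [innerA, innerA_go_dp, if_neg]
        rintro ⟨h1, h2, h3⟩
        exact hc ⟨List.mem_range.mp h1, h2, h3⟩
      rcases hex with ⟨e', he', hce⟩
      rcases List.mem_cons.mp he' with rfl | he2
      · exact absurd hce hc
      · exact ih _ p (innerA_pres_ge delta e _ st hge) (by rw [hval']; exact hval) ⟨e', he2, hce⟩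
theorem bdp_fuel (delta : List (List Int)) (N I : Nat) :
    ∀ (mask f1 f2 v : Nat), mask ≤ f1 → mask ≤ f2 →
      bdp delta N I f1 mask v = bdp delta N I f2 mask v := by
  intro mask
  induction mask using Nat.strong_induction_on with
  | _ mask ih =>
    intro f1 f2 v h1 h2
    rw [bdp.eq_def, bdp.eq_def]
    by_cases hv : v = I
    · simp [hv]
    · rw [if_neg hv, if_neg hv]
      by_cases hg : ¬ mask.testBit v = true ∨ ¬ mask.testBit I = true
      · rw [if_pos hg, if_pos hg]
      · rw [if_neg hg, if_neg hg]
        have htv : mask.testBit v = true := by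
          rcases Bool.eq_false_or_eq_true (mask.testBit v) with h | h
          · exact h
          · exact absurd (Or.inl (by simp [h])) hg
        have hge1 : 1 ≤ mask := le_trans Nat.one_le_two_pow (pv_tb_ge htv)
        obtain ⟨g1, rfl⟩ : ∃ g, f1 = g + 1 := ⟨f1 - 1, by omega⟩
        obtain ⟨g2, rfl⟩ : ∃ g, f2 = g + 1 := ⟨f2 - 1, by omega⟩
        dsimp only
        have hlt := pv_xor_lt htv
        have hcongr : (fun (best : Int) (u : Nat) =>
            if (mask ^^^ 2 ^ v).testBit u then
              max best (min (bdp delta N I g1 (mask ^^^ 2 ^ v) u) (pvGet2 delta u v))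
            else best) = (fun (best : Int) (u : Nat) =>
            if (mask ^^^ 2 ^ v).testBit u then
              max best (min (bdp delta N I g2 (mask ^^^ 2 ^ v) u) (pvGet2 delta u v))
            else best) := by
          funext best u
          by_cases ht : (mask ^^^ 2 ^ v).testBit u
          · rw [if_pos ht, if_pos ht, ih _ hlt g1 g2 u (by omega) (by omega)]
          · rw [if_neg ht, if_neg ht]
        rw [hcongr]

-- the exact dp value the spec assigns to state (mask, v)
def DD (delta : List (List Int)) (N I m v : Nat) : Int := bdp delta N I m m v

theorem DD_I (delta : List (List Int)) (N I m : Nat) :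
    DD delta N I m I = if m = 2 ^ I then 2000000000 else -1 := by
  rw [DD, bdp.eq_def]; simp

theorem DD_nb (delta : List (List Int)) (N I m v : Nat) (hv : v ≠ I)
    (h : ¬ m.testBit v = true ∨ ¬ m.testBit I = true) : DD delta N I m v = -1 := by
  rw [DD, bdp.eq_def, if_neg hv, if_pos h]

theorem DD_unfold (delta : List (List Int)) (N I m v : Nat) (hv : v ≠ I)
    (h1 : m.testBit v = true) (h2 : m.testBit I = true) :
    DD delta N I m v =
      (((List.range N).filter (fun u => (m ^^^ 2 ^ v).testBit u)).map
        (fun u => min (DD delta N I (m ^^^ 2 ^ v) u) (pvGet2 delta u v))).foldl max (-1) := by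
  have hge1 : 1 ≤ m := le_trans Nat.one_le_two_pow (pv_tb_ge h1)
  have hlt := pv_xor_lt h1
  have key : ∀ f, m ≤ f → bdp delta N I f m v =
      (((List.range N).filter (fun u => (m ^^^ 2 ^ v).testBit u)).map
        (fun u => min (DD delta N I (m ^^^ 2 ^ v) u) (pvGet2 delta u v))).foldl max (-1) := by
    intro f hf
    obtain ⟨g, rfl⟩ : ∃ g, f = g + 1 := ⟨f - 1, by omega⟩
    rw [bdp.eq_def, if_neg hv, if_neg (by rw [h1, h2]; simp)]
    dsimp only
    rw [foldl_if_max]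
    have hmap : ((List.range N).filter (fun u => (m ^^^ 2 ^ v).testBit u)).map
        (fun u => min (bdp delta N I g (m ^^^ 2 ^ v) u) (pvGet2 delta u v))
      = ((List.range N).filter (fun u => (m ^^^ 2 ^ v).testBit u)).map
        (fun u => min (DD delta N I (m ^^^ 2 ^ v) u) (pvGet2 delta u v)) := by
      apply List.map_congr_left
      intro u hu
      rw [DD, bdp_fuel delta N I (m ^^^ 2 ^ v) g _ u (by omega) le_rfl]
    rw [hmap]
  exact key m le_rfl

theorem DD_ge (delta : List (List Int)) (N I m v : Nat) : -1 ≤ DD delta N I m v := by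
  rw [DD, bdp.eq_def]
  by_cases hv : v = I
  · rw [if_pos hv]; split_ifs <;> norm_num
  · rw [if_neg hv]
    by_cases hg : ¬ m.testBit v = true ∨ ¬ m.testBit I = true
    · rw [if_pos hg]
    · rw [if_neg hg]
      cases m with
      | zero => exact le_rfl
      | succ g =>
        dsimp only
        rw [foldl_if_max]
        exact le_foldl_max _ _

theorem DD_high (delta : List (List Int)) (N I : Nat) (hI : I < N) :
    ∀ m v, v < N → ¬ m < 2 ^ N → DD delta N I m v = -1 := by
  intro m
  induction m using Nat.strong_induction_on with
  | _ m ih =>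
    intro v hv hm
    have h2IN : (2 : Nat) ^ I < 2 ^ N := Nat.pow_lt_pow_right (by norm_num) hI
    by_cases hvI : v = I
    · subst hvI
      rw [DD_I, if_neg (by omega)]
    · by_cases htv : m.testBit v = true
      · by_cases htI : m.testBit I = true
        · rw [DD_unfold delta N I m v hvI htv htI]
          obtain ⟨j, hjN, hjt⟩ := pv_high_exists hm
          have hjrest : (m ^^^ 2 ^ v).testBit j = true := by
            rw [pv_xor_tb_other (by omega)]; exact hjt
          have hrest : ¬ (m ^^^ 2 ^ v) < 2 ^ N := by
            intro hc
            have := pv_bit_lt hjrest hc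
            omega
          apply le_antisymm
          · rw [foldl_max_le_iff]
            refine ⟨le_rfl, ?_⟩
            intro x hx
            simp only [List.mem_map, List.mem_filter, List.mem_range] at hx
            obtain ⟨u, ⟨huN, hut⟩, rfl⟩ := hx
            calc min (DD delta N I (m ^^^ 2 ^ v) u) (pvGet2 delta u v)
                ≤ DD delta N I (m ^^^ 2 ^ v) u := min_le_left _ _
              _ = -1 := ih _ (pv_xor_lt htv) u huN hrest
          · exact le_foldl_max _ _
        · exact DD_nb delta N I m v hvI (Or.inr (by simp [htI]))
      · exact DD_nb delta N I m v hvI (Or.inl (by simp [htv]))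

theorem DD_small (delta : List (List Int)) (N I m v : Nat) (hI : I < N) (hv : v < N)
    (hp : pcB N m ≤ 1) (hne : ¬ (m = 2 ^ I ∧ v = I)) : DD delta N I m v = -1 := by
  by_cases hvI : v = I
  · subst hvI
    rw [DD_I, if_neg (fun hc => hne ⟨hc, rfl⟩)]
  · by_cases htv : m.testBit v = true
    · by_cases htI : m.testBit I = true
      · by_cases hm : m < 2 ^ N
        · have := pcB_two_le hv hI hvI htv htI
          omega
        · exact DD_high delta N I hI m v hv hm
      · exact DD_nb delta N I m v hvI (Or.inr (by simp [htI]))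
    · exact DD_nb delta N I m v hvI (Or.inl (by simp [htv]))
theorem pv_or_lt {a v N : Nat} (ha : a < 2 ^ N) (hv : v < N) : a ||| 2 ^ v < 2 ^ N := by
  apply pv_lt_two_pow
  intro j hj
  rw [Nat.testBit_or] at hj
  rcases Bool.or_eq_true_iff.mp hj with h | h
  · exact pv_bit_lt h ha
  · rw [Nat.testBit_two_pow] at h
    have : v = j := by simpa using h
    omega

def ValidS (N I m v : Nat) : Prop :=
  v < N ∧ m < 2 ^ N ∧ m.testBit v = true ∧ m.testBit I = true ∧ (v = I → m = 2 ^ I)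

theorem contribs_nil (delta : List (List Int)) (N : Nat) (dpc : Nat → Nat → Int)
    (s : List (Nat × Nat)) (m v : Nat)
    (h : ∀ e ∈ s, ¬ (v < N ∧ e.1.testBit v = false ∧ m = e.1 ||| 2 ^ v)) :
    contribs delta N dpc s m v = [] := by
  rw [contribs, List.filterMap_eq_nil_iff]
  intro e he
  rw [if_neg (h e he)]

theorem cell_eq (delta : List (List Int)) (N I : Nat) (hI : I < N)
    (dpc : Nat → Nat → Int) (stk : List (Nat × Nat)) (t m v : Nat)
    (hstack : ∀ p : Nat × Nat, p ∈ stk ↔ (ValidS N I p.1 p.2 ∧ pcB N p.1 = t + 1))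
    (hdp : ∀ m' v', v' < N → dpc m' v' = if pcB N m' ≤ t + 1 then DD delta N I m' v' else -1)
    (hv : v < N) (hm : pcB N m = t + 2) :
    (contribs delta N dpc stk m v).foldl max (-1) = DD delta N I m v := by
  by_cases hmN : m < 2 ^ N
  case neg =>
    rw [contribs_nil delta N dpc stk m v (by
      rintro e he ⟨hc1, hc2, hc3⟩
      have hV := ((hstack e).mp he).1
      exact hmN (hc3 ▸ pv_or_lt hV.2.1 hc1))]
    rw [DD_high delta N I hI m v hv hmN]
    rfl
  by_cases htv : m.testBit v = true
  case neg =>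
    rw [contribs_nil delta N dpc stk m v (by
      rintro e he ⟨hc1, hc2, hc3⟩
      exact htv (by rw [hc3]; simp [Nat.testBit_or]))]
    by_cases hvI : v = I
    · subst hvI
      rw [DD_I, if_neg (fun hc => htv (by rw [hc]; simp [Nat.testBit_two_pow]))]
      rfl
    · rw [DD_nb delta N I m v hvI (Or.inl (by simp [Bool.eq_false_iff.mpr htv]))]
      rfl
  by_cases htI : m.testBit I = true
  case neg =>
    rw [contribs_nil delta N dpc stk m v (by
      rintro e he ⟨hc1, hc2, hc3⟩
      have hV := ((hstack e).mp he).1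
      refine htI ?_
      rw [hc3]
      by_cases hIv : I = v
      · subst hIv; simp [Nat.testBit_or]
      · rw [pv_or_tb_other hIv]; exact hV.2.2.2.1)]
    have hvI : v ≠ I := fun hc => htI (hc ▸ htv)
    rw [DD_nb delta N I m v hvI (Or.inr (by simp [Bool.eq_false_iff.mpr htI]))]
    rfl
  by_cases hvI : v = I
  case pos =>
    subst hvI
    rw [contribs_nil delta N dpc stk m v (by
      rintro e he ⟨hc1, hc2, hc3⟩
      have hV := ((hstack e).mp he).1
      rw [hV.2.2.2.1] at hc2
      exact absurd hc2 (by decide))]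
    rw [DD_I, if_neg (fun hc => by rw [hc, pcB_two_pow hI] at hm; omega)]
    rfl
  -- main case
  have hrestv : (m ^^^ 2 ^ v).testBit v = false := by rw [pv_xor_tb, htv]; rfl
  have hrestI : (m ^^^ 2 ^ v).testBit I = true := by
    rw [pv_xor_tb_other (fun hc => hvI hc.symm)]; exact htI
  have hrlt : (m ^^^ 2 ^ v) < 2 ^ N := lt_trans (pv_xor_lt htv) hmN
  have hpcrest : pcB N (m ^^^ 2 ^ v) = t + 1 := by
    have := pcB_xor hv htv (m := m)
    omega
  have hor : (m ^^^ 2 ^ v) ||| 2 ^ v = m := pv_or_xor_cancel htv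
  rw [DD_unfold delta N I m v hvI htv htI]
  apply le_antisymm
  · rw [foldl_max_le_iff]
    refine ⟨le_foldl_max _ _, ?_⟩
    intro x hx
    rw [contribs, List.mem_filterMap] at hx
    obtain ⟨e, he, hfe⟩ := hx
    by_cases hc : v < N ∧ e.1.testBit v = false ∧ m = e.1 ||| 2 ^ v
    case neg => rw [if_neg hc] at hfe; exact absurd hfe (by simp)
    rw [if_pos hc] at hfe
    obtain ⟨hc1, hc2, hc3⟩ := hc
    have he1 : e.1 = m ^^^ 2 ^ v := by rw [hc3, pv_xor_or_cancel hc2]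
    obtain ⟨hV, hpc⟩ := (hstack e).mp he
    have hdpe : dpc e.1 e.2 = DD delta N I e.1 e.2 := by
      rw [hdp _ _ hV.1, if_pos (by omega)]
    apply mem_le_foldl_max
    rw [List.mem_map]
    refine ⟨e.2, ?_, ?_⟩
    · rw [List.mem_filter, List.mem_range]
      exact ⟨by simpa using hV.1, by rw [← he1]; exact hV.2.2.1⟩
    · have hx := Option.some_inj.mp hfe
      rw [← hx, hdpe, he1]
  · rw [foldl_max_le_iff]
    refine ⟨le_foldl_max _ _, ?_⟩
    intro x hx
    rw [List.mem_map] at hx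
    obtain ⟨u, hu, rfl⟩ := hx
    rw [List.mem_filter, List.mem_range] at hu
    obtain ⟨huN, hut⟩ := hu
    by_cases huI : u = I
    · rw [huI] at hut ⊢
      by_cases hre : m ^^^ 2 ^ v = 2 ^ I
      · have hmem : ((m ^^^ 2 ^ v, I) : Nat × Nat) ∈ stk := by
          rw [hstack]
          exact ⟨⟨hI, hrlt, hrestI, hrestI, fun _ => hre⟩, hpcrest⟩
        apply mem_le_foldl_max
        rw [contribs, List.mem_filterMap]
        refine ⟨(m ^^^ 2 ^ v, I), hmem, ?_⟩
        rw [if_pos ⟨hv, hrestv, hor.symm⟩]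
        have : dpc (m ^^^ 2 ^ v) I = DD delta N I (m ^^^ 2 ^ v) I := by
          rw [hdp _ _ hI, if_pos (by omega)]
        rw [this]
      · have hDD : DD delta N I (m ^^^ 2 ^ v) I = -1 := by rw [DD_I, if_neg hre]
        calc min (DD delta N I (m ^^^ 2 ^ v) I) (pvGet2 delta I v)
            ≤ DD delta N I (m ^^^ 2 ^ v) I := min_le_left _ _
          _ = -1 := hDD
          _ ≤ _ := le_foldl_max _ _
    · have hmem : ((m ^^^ 2 ^ v, u) : Nat × Nat) ∈ stk := by
        rw [hstack]
        exact ⟨⟨huN, hrlt, hut, hrestI, fun hc => absurd hc huI⟩, hpcrest⟩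
      apply mem_le_foldl_max
      rw [contribs, List.mem_filterMap]
      refine ⟨(m ^^^ 2 ^ v, u), hmem, ?_⟩
      rw [if_pos ⟨hv, hrestv, hor.symm⟩]
      have : dpc (m ^^^ 2 ^ v) u = DD delta N I (m ^^^ 2 ^ v) u := by
        rw [hdp _ _ huN, if_pos (by omega)]
      rw [this]
-- loop invariant after t layers of A's BFS
def InvP (delta : List (List Int)) (N I t : Nat)
    (st : (Nat → Nat → Int) × List (Nat × Nat)) : Prop :=
  (∀ m v, v < N → st.1 m v = if pcB N m ≤ t + 1 then DD delta N I m v else -1) ∧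
  (∀ m v, N ≤ v → st.1 m v = -1) ∧
  (∀ p : Nat × Nat, p ∈ st.2 ↔ (ValidS N I p.1 p.2 ∧ pcB N p.1 = t + 1))

theorem inv_ge (delta : List (List Int)) (N I t : Nat)
    (st : (Nat → Nat → Int) × List (Nat × Nat)) (h : InvP delta N I t st) :
    ∀ m v, -1 ≤ st.1 m v := by
  intro m v
  by_cases hv : v < N
  · rw [h.1 m v hv]
    split_ifs
    · exact DD_ge delta N I m v
    · exact le_rfl
  · rw [h.2.1 m v (by omega)]

theorem inv_base (delta : List (List Int)) (N I : Nat) (hI : I < N) :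
    InvP delta N I 0 ((fun m v => if m = 2 ^ I ∧ v = I then 2000000000 else -1), [(2 ^ I, I)]) := by
  refine ⟨?_, ?_, ?_⟩
  · intro m v hv
    dsimp only
    by_cases hc : m = 2 ^ I ∧ v = I
    · obtain ⟨rfl, rfl⟩ := hc
      rw [if_pos ⟨rfl, rfl⟩, if_pos (by rw [pcB_two_pow hI]), DD_I, if_pos rfl]
    · rw [if_neg hc]
      by_cases hp : pcB N m ≤ 1
      · rw [if_pos hp, DD_small delta N I m v hI hv hp hc]
      · rw [if_neg hp]
  · intro m v hvN
    dsimp only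
    rw [if_neg]
    rintro ⟨-, rfl⟩
    omega
  · intro p
    constructor
    · intro hp
      rw [List.mem_singleton] at hp
      subst hp
      exact ⟨⟨hI, Nat.pow_lt_pow_right (by norm_num) hI, by simp [Nat.testBit_two_pow],
        by simp [Nat.testBit_two_pow], fun _ => rfl⟩, pcB_two_pow hI⟩
    · rintro ⟨⟨hv, hm, htv, htI, himp⟩, hpc⟩
      have h1 : p.1 = 2 ^ I := pcB_one htI hm (by omega)
      have h2 : p.2 = I := by
        rw [h1, Nat.testBit_two_pow] at htv
        have := of_decide_eq_true htv
        omega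
      rw [List.mem_singleton, Prod.ext_iff]
      exact ⟨h1, h2⟩

theorem inv_step (delta : List (List Int)) (N I t : Nat) (hI : I < N)
    (st : (Nat → Nat → Int) × List (Nat × Nat)) (h : InvP delta N I t st) :
    InvP delta N I (t + 1) (layerA delta N st) := by
  obtain ⟨h1, h2, h3⟩ := h
  have hge := inv_ge delta N I t st ⟨h1, h2, h3⟩
  have hs : ∀ e ∈ st.2, pcB N e.1 = t + 1 := fun e he => ((h3 e).mp he).2
  unfold layerA
  refine ⟨?_, ?_, ?_⟩
  · intro m v hv
    rw [layer_go_dp delta N (t + 1) st.2 (st.1, []) m v hs]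
    show (contribs delta N st.1 st.2 m v).foldl max (st.1 m v) = _
    by_cases hp : pcB N m ≤ t + 1
    · rw [contribs_nil delta N st.1 st.2 m v (by
        rintro e he ⟨hc1, hc2, hc3⟩
        have := hs e he
        rw [hc3, pcB_or hc1 hc2] at hp
        omega)]
      rw [List.foldl_nil, h1 m v hv, if_pos hp, if_pos (by omega)]
    · by_cases hp2 : pcB N m = t + 2
      · have hstart : st.1 m v = -1 := by rw [h1 m v hv, if_neg hp]
        rw [hstart, cell_eq delta N I hI st.1 st.2 t m v h3 h1 hv hp2, if_pos (by omega)]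
      · rw [contribs_nil delta N st.1 st.2 m v (by
          rintro e he ⟨hc1, hc2, hc3⟩
          have := hs e he
          rw [hc3, pcB_or hc1 hc2] at hp2
          omega)]
        rw [List.foldl_nil, h1 m v hv, if_neg hp, if_neg (by omega)]
  · intro m v hvN
    rw [layer_go_dp delta N (t + 1) st.2 (st.1, []) m v hs]
    show (contribs delta N st.1 st.2 m v).foldl max (st.1 m v) = _
    rw [contribs_nil delta N st.1 st.2 m v (fun e he hc => by omega)]
    rw [List.foldl_nil, h2 m v hvN]
  · intro p
    constructor
    · intro hp
      rcases layer_next_sub delta N st.2 (st.1, []) p hge hp with hin | ⟨e, he, hc1, hc2, hc3⟩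
      · exact absurd hin (List.not_mem_nil)
      · obtain ⟨⟨hev, hem, hetv, hetI, heimp⟩, hepc⟩ := (h3 e).mp he
        refine ⟨⟨hc1, hc3 ▸ pv_or_lt hem hc1, by rw [hc3]; simp [Nat.testBit_or], ?_, ?_⟩, ?_⟩
        · rw [hc3]
          by_cases hIp : I = p.2
          · rw [hIp]; simp [Nat.testBit_or]
          · rw [pv_or_tb_other hIp]; exact hetI
        · intro hpI
          rw [hpI] at hc2
          rw [hetI] at hc2
          exact absurd hc2 (by decide)
        · rw [hc3, pcB_or hc1 hc2, hepc]
    · rintro ⟨⟨hpv, hpm, hptv, hptI, hpimp⟩, hppc⟩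
      have hpI : p.2 ≠ I := by
        intro hc
        rw [hpimp hc, pcB_two_pow hI] at hppc
        omega
      have hstart : st.1 p.1 p.2 = -1 := by rw [h1 _ _ hpv, if_neg (by omega)]
      have hrestI : (p.1 ^^^ 2 ^ p.2).testBit I = true := by
        rw [pv_xor_tb_other (fun hc => hpI hc.symm)]; exact hptI
      have hrlt : p.1 ^^^ 2 ^ p.2 < 2 ^ N := lt_trans (pv_xor_lt hptv) hpm
      have hrestpc : pcB N (p.1 ^^^ 2 ^ p.2) = t + 1 := by
        have := pcB_xor hpv hptv (m := p.1)
        omega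
      have hrestv : (p.1 ^^^ 2 ^ p.2).testBit p.2 = false := by rw [pv_xor_tb, hptv]; rfl
      have hback : (p.1 ^^^ 2 ^ p.2) ||| 2 ^ p.2 = p.1 := pv_or_xor_cancel hptv
      apply layer_next_push delta N (t + 1) st.2 (st.1, []) p hge hstart
      by_cases hre : p.1 ^^^ 2 ^ p.2 = 2 ^ I
      · refine ⟨(p.1 ^^^ 2 ^ p.2, I), ?_, hpv, hrestv, hback.symm⟩
        rw [h3]
        exact ⟨⟨hI, hrlt, hrestI, hrestI, fun _ => hre⟩, hrestpc⟩
      · obtain ⟨u, huI, hut⟩ := pv_other_bit hrestI hre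
        refine ⟨(p.1 ^^^ 2 ^ p.2, u), ?_, hpv, hrestv, hback.symm⟩
        rw [h3]
        exact ⟨⟨pv_bit_lt hut hrlt, hrlt, hut, hrestI, fun hc => absurd hc huI⟩, hrestpc⟩

theorem inv_main (delta : List (List Int)) (N I : Nat) (hI : I < N) :
    ∀ k, InvP delta N I k ((List.range k).foldl (fun st _t => layerA delta N st)
      ((fun m v => if m = 2 ^ I ∧ v = I then 2000000000 else -1), [(2 ^ I, I)])) := by
  intro k
  induction k with
  | zero => simpa using inv_base delta N I hI
  | succ k ih =>
    rw [List.range_succ, List.foldl_append, List.foldl_cons, List.foldl_nil]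
    exact inv_step delta N I k hI _ ih
-- ===== VERDICT (by name: the statement is the Claim_ definition above) =====
theorem solve_spec : Claim_equal_solve := by
  intro i n delta delta2 hdom hpre
  obtain ⟨hn2, hi0, hin, -, -⟩ := hpre
  have hI : i.toNat < n.toNat := by omega
  show solve i n delta delta2 = solve_alt i n delta delta2
  unfold solve solve_alt
  dsimp only
  have hcands : (List.range n.toNat).filterMap (fun j =>
      if j ≠ i.toNat then some (min (pvGet2 delta2 j i.toNat)
        (((List.range n.toNat).foldl (fun st _t => layerA delta n.toNat st)
          ((fun m v => if m = 2 ^ i.toNat ∧ v = i.toNat then 2000000000 else -1),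
            [(2 ^ i.toNat, i.toNat)])).1 (2 ^ n.toNat - 1) j)) else none)
      = (List.range n.toNat).filterMap (fun j =>
      if j ≠ i.toNat then some (min (pvGet2 delta2 j i.toNat)
        (bdp delta n.toNat i.toNat (2 ^ n.toNat - 1) (2 ^ n.toNat - 1) j)) else none) := by
    apply List.filterMap_congr
    intro j hj
    rw [List.mem_range] at hj
    by_cases hji : j = i.toNat
    · rw [if_neg (not_not_intro hji), if_neg (not_not_intro hji)]
    · rw [if_pos hji, if_pos hji]
      have hinv := (inv_main delta n.toNat i.toNat hI n.toNat).1 (2 ^ n.toNat - 1) j hj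
      rw [if_pos (by rw [pcB_full]; omega)] at hinv
      rw [hinv, DD]
  rw [hcands]
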